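-- pv_equiv track=rewrite | github.com/IvanBesedin/Bobko_code | Shennona-Fano_back/shennonFanoDecompression.py | shennon_fano_decompression
-- ===== SOURCE A (Python) =====
-- def shennon_fano_decompression(code, dict_binary_to_letters):
--     """Decompresses a string code of 0 -s and 1 -s, using a dictionary, and returns a letter string.
--
--     Takes as a parameter a string code of 0 -s and 1 -s, and a dictionary that has a structure {Binary code : Letter}
--     """
--     message = ""
--     symbol = ""
--
--     for n in code:
--         symbol += n
--         attempt = dict_binary_to_letters.get(symbol, False)
--
--         if attempt:
--             message += attempt
--             symbol = ""
--
--         #if len(symbol) == mayor(lengths):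
--             #break
--
--     #if len(symbol) == mayor(lengths):
--     #    return "Обнаружена ошибка."
--     #else:
--     return message
-- ===== SOURCE B (Python) =====
-- def shennon_fano_decompression(code, dict_binary_to_letters):
--     """Decompresses a string code of 0 -s and 1 -s, using a dictionary, and returns a letter string.
--
--     Trie-based: walk node by node instead of growing a symbol string and hashing it.
--     """
--     # build a trie: children keyed by characters, the stored letter under the key None
--     root = {}
--     for key, letter in dict_binary_to_letters.items():
--         node = root
--         for ch in key:
--             node = node.setdefault(ch, {})
--         node.setdefault(None, letter)
--     out = []
--     node = root
--     for ch in code: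
--         if node is not None:
--             node = node.get(ch)
--             if node is not None:
--                 letter = node.get(None)
--                 if letter:
--                     out.append(letter)
--                     node = root
--     return "".join(out)
-- ===== Notes on version B (the rewrite author's own statement) =====
-- stated objective: alternative
-- what changed: B builds a prefix trie from the code table once and decodes by walking a node pointer character by character (resetting to the root on each emitted letter, entering a dead state off the trie), instead of A's growing a symbol string and hashing it into the dict at every character.
import Mathlib
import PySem

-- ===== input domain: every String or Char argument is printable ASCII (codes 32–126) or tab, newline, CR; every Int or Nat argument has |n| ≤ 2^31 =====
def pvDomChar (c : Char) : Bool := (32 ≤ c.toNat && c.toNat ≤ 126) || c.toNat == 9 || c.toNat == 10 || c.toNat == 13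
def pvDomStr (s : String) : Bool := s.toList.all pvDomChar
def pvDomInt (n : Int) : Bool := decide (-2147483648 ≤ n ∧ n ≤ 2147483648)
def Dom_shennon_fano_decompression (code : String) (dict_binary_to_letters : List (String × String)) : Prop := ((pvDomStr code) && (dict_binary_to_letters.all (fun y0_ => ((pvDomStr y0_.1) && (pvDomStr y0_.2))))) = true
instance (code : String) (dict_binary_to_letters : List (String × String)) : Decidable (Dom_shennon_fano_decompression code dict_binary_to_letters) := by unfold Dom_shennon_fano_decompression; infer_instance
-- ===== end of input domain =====

-- B replaces A's grow-a-symbol-string-and-hash loop by a prefix trie walked node by node (alternative data structure; avoids re-hashing a growing symbol string).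

-- ===== PORT A =====
-- dict.get(symbol, False): first match in the association list (the dict in insertion order)
def pvLookup (d : List (List Char × String)) (k : List Char) : Option String :=
  match d with
  | [] => none
  | (k', v) :: rest => if k' = k then some v else pvLookup rest k

-- one iteration of A's `for n in code` body, state = (message, symbol) as char lists
def pvAStep (d : List (List Char × String)) (st : List Char × List Char) (n : Char) :
    List Char × List Char :=
  let symbol := st.2 ++ [n]
  match pvLookup d symbol with
  | some attempt => if attempt ≠ "" then (st.1 ++ attempt.toList, []) else (st.1, symbol)
  | none => (st.1, symbol)

def shennon_fano_decompression (code : String) (dict_binary_to_letters : List (String × String)) : String :=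
  let d := dict_binary_to_letters.map (fun p => (p.1.toList, p.2))
  String.mk (code.toList.foldl (pvAStep d) ([], [])).1

-- ===== PORT B =====
mutual
  inductive PvTrie where
    | node : Option String → PvKids → PvTrie
  deriving Repr
  inductive PvKids where
    | nil : PvKids
    | cons : Char → PvTrie → PvKids → PvKids
  deriving Repr
end

def PvTrie.letter : PvTrie → Option String
  | .node l _ => l

def PvTrie.kids : PvTrie → PvKids
  | .node _ k => k

def pvKidGet : PvKids → Char → Option PvTrie
  | .nil, _ => none
  | .cons c t rest, ch => if c = ch then some t else pvKidGet rest ch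

def pvKidSet : PvKids → Char → PvTrie → PvKids
  | .nil, ch, u => .cons ch u .nil
  | .cons c t rest, ch, u => if c = ch then .cons c u rest else .cons c t (pvKidSet rest ch u)

-- insert one (key, letter); `setdefault` on the letter keeps the first stored value
def pvInsert : PvTrie → List Char → String → PvTrie
  | .node l k, [], v => .node (match l with | some w => some w | none => some v) k
  | .node l k, ch :: cs, v =>
      let child := (pvKidGet k ch).getD (.node none .nil)
      .node l (pvKidSet k ch (pvInsert child cs v))

def pvBuild (d : List (List Char × String)) : PvTrie :=
  d.foldl (fun t p => pvInsert t p.1 p.2) (.node none .nil)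

-- one iteration of B's decode loop, state = (current node or dead, output chars)
def pvBStep (root : PvTrie) (st : Option PvTrie × List Char) (ch : Char) :
    Option PvTrie × List Char :=
  match st.1.bind (fun t => pvKidGet t.kids ch) with
  | none => (none, st.2)
  | some u =>
      match u.letter with
      | some v => if v ≠ "" then (some root, st.2 ++ v.toList) else (some u, st.2)
      | none => (some u, st.2)

def shennon_fano_decompression_alt (code : String) (dict_binary_to_letters : List (String × String)) : String :=
  let root := pvBuild (dict_binary_to_letters.map (fun p => (p.1.toList, p.2)))
  String.mk (code.toList.foldl (pvBStep root) (some root, [])).2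

-- ===== PRECONDITION & SPEC =====
def Spec_shennon_fano_decompression (code : String) (dict_binary_to_letters : List (String × String)) (out : String) : Prop := out = shennon_fano_decompression_alt code dict_binary_to_letters
instance (code : String) (dict_binary_to_letters : List (String × String)) (out : String) : Decidable (Spec_shennon_fano_decompression code dict_binary_to_letters out) := by unfold Spec_shennon_fano_decompression; infer_instance

-- ===== CLAIM (what is proved, stated in full; the proofs are below) =====
def Claim_equal_shennon_fano_decompression : Prop := ∀ (code : String) (dict_binary_to_letters : List (String × String)), Dom_shennon_fano_decompression code dict_binary_to_letters → Spec_shennon_fano_decompression code dict_binary_to_letters (shennon_fano_decompression code dict_binary_to_letters)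

-- ===== LEMMAS AND PROOFS =====

-- walking a whole string down the trie
def pvFind : PvTrie → List Char → Option PvTrie
  | t, [] => some t
  | t, c :: cs => match pvKidGet t.kids c with
      | none => none
      | some u => pvFind u cs

-- the letter stored at the end of path s
def pvLetterAt (t : PvTrie) (s : List Char) : Option String :=
  (pvFind t s).bind PvTrie.letter

theorem pvFind_snoc (t : PvTrie) (s : List Char) (c : Char) :
    pvFind t (s ++ [c]) = (pvFind t s).bind (fun u => pvKidGet u.kids c) := by
  induction s generalizing t with
  | nil => simp [pvFind]; cases pvKidGet t.kids c <;> rfl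
  | cons a as ih =>
      simp only [List.cons_append, pvFind]
      cases pvKidGet t.kids a with
      | none => rfl
      | some u => exact ih u

theorem pvKidGet_set : ∀ (k : PvKids) (ch c : Char) (u : PvTrie),
    pvKidGet (pvKidSet k ch u) c = if ch = c then some u else pvKidGet k c
  | .nil, ch, c, u => by
      by_cases h : ch = c <;> simp [pvKidSet, pvKidGet, h]
  | .cons a t rest, ch, c, u => by
      by_cases h1 : a = ch
      · subst h1
        simp only [pvKidSet]
        by_cases h2 : a = c <;> simp [pvKidGet, h2]
      · simp only [pvKidSet, if_neg h1, pvKidGet, pvKidGet_set rest ch c u]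
        by_cases h2 : a = c
        · subst h2
          have hca : ¬ ch = a := fun hh => h1 (Eq.symm hh)
          simp [hca]
        · simp [h2]

theorem pvLetterAt_empty (s : List Char) :
    pvLetterAt (.node none .nil) s = none := by
  cases s <;> simp [pvLetterAt, pvFind, pvKidGet, PvTrie.kids, PvTrie.letter]

theorem pvLetterAt_cons (l : Option String) (kids : PvKids) (ch : Char) (s : List Char) :
    pvLetterAt (.node l kids) (ch :: s) =
      pvLetterAt ((pvKidGet kids ch).getD (.node none .nil)) s := by
  cases hg : pvKidGet kids ch with
  | none =>
      simp only [pvLetterAt, pvFind, PvTrie.kids, hg, Option.getD]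
      cases s with
      | nil => rfl
      | cons a as => exact (pvLetterAt_empty (a :: as)).symm
  | some u => simp [pvLetterAt, pvFind, PvTrie.kids, hg]

theorem pvLetterAt_insert : ∀ (t : PvTrie) (k : List Char) (v : String) (s : List Char),
    pvLetterAt (pvInsert t k v) s =
      if s = k then (pvLetterAt t k).or (some v) else pvLetterAt t s := by
  intro t k v
  induction k generalizing t with
  | nil =>
      intro s
      cases t with
      | node l kids =>
        cases s with
        | nil =>
            cases l <;> simp [pvLetterAt, pvFind, pvInsert, PvTrie.letter, Option.or]
        | cons c cs =>
            simp [pvLetterAt, pvFind, pvInsert, PvTrie.kids]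
  | cons ch kt ih =>
      intro s
      cases t with
      | node l kids =>
        cases s with
        | nil => simp [pvLetterAt, pvFind, pvInsert, PvTrie.letter]
        | cons c cs =>
            by_cases hc : ch = c
            · subst hc
              have hL : pvLetterAt (pvInsert (PvTrie.node l kids) (ch :: kt) v) (ch :: cs) =
                  pvLetterAt (pvInsert ((pvKidGet kids ch).getD (.node none .nil)) kt v) cs := by
                simp only [pvInsert]
                rw [pvLetterAt_cons, pvKidGet_set, if_pos rfl, Option.getD]
              rw [hL, ih, pvLetterAt_cons l kids ch kt, pvLetterAt_cons l kids ch cs]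
              by_cases hcs : cs = kt <;> simp [hcs]
            · have hne : ¬(c :: cs = ch :: kt) :=
                by intro h; injection h with hh _; exact hc hh.symm
              rw [if_neg hne]
              simp only [pvInsert]
              rw [pvLetterAt_cons, pvKidGet_set, if_neg hc, ← pvLetterAt_cons]

theorem pvLetterAt_build_aux (d : List (List Char × String)) (t : PvTrie) (s : List Char) :
    pvLetterAt (d.foldl (fun t p => pvInsert t p.1 p.2) t) s =
      (pvLetterAt t s).or (pvLookup d s) := by
  induction d generalizing t with
  | nil => simp [pvLookup]
  | cons p rest ih =>
      simp only [List.foldl_cons, ih, pvLetterAt_insert, pvLookup]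
      by_cases h : s = p.1
      · subst h
        simp
      · have h2 : ¬ p.1 = s := fun hh => h (Eq.symm hh)
        simp [h, h2]

theorem pvLetterAt_build (d : List (List Char × String)) (s : List Char) :
    pvLetterAt (pvBuild d) s = pvLookup d s := by
  rw [pvBuild, pvLetterAt_build_aux, pvLetterAt_empty, Option.none_or]

-- the loop invariant: B's node pointer is A's symbol walked down the trie, outputs agree
theorem pv_loop (d : List (List Char × String)) (cs : List Char) (msg sym : List Char) :
    (cs.foldl (pvAStep d) (msg, sym)).1 =
      (cs.foldl (pvBStep (pvBuild d)) (pvFind (pvBuild d) sym, msg)).2 := by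
  induction cs generalizing msg sym with
  | nil => rfl
  | cons c rest ih =>
      have hsnoc := pvFind_snoc (pvBuild d) sym c
      have hlook : pvLookup d (sym ++ [c]) = (pvFind (pvBuild d) (sym ++ [c])).bind PvTrie.letter :=
        (pvLetterAt_build d (sym ++ [c])).symm
      have hA : pvAStep d (msg, sym) c =
          match pvLookup d (sym ++ [c]) with
          | some attempt => if attempt ≠ "" then (msg ++ attempt.toList, []) else (msg, sym ++ [c])
          | none => (msg, sym ++ [c]) := rfl
      have hB : pvBStep (pvBuild d) (pvFind (pvBuild d) sym, msg) c =
          match pvFind (pvBuild d) (sym ++ [c]) with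
          | none => (none, msg)
          | some u =>
              match u.letter with
              | some v => if v ≠ "" then (some (pvBuild d), msg ++ v.toList) else (some u, msg)
              | none => (some u, msg) := by
        simp only [pvBStep, ← hsnoc]
      simp only [List.foldl_cons, hA, hB]
      cases hf : pvFind (pvBuild d) (sym ++ [c]) with
      | none =>
          rw [hf] at hlook
          simp only [Option.bind] at hlook
          rw [hlook]
          have h2 := ih msg (sym ++ [c])
          rw [hf] at h2
          exact h2
      | some u =>
          rw [hf] at hlook
          cases u with
          | node l kids =>
            cases l with
            | none =>
                simp only [PvTrie.letter, Option.bind] at hlook ⊢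
                rw [hlook]
                have h2 := ih msg (sym ++ [c])
                rw [hf] at h2
                exact h2
            | some v =>
                simp only [PvTrie.letter, Option.bind] at hlook ⊢
                rw [hlook]
                by_cases hv : v = ""
                · subst hv
                  simp only [ne_eq, not_true_eq_false, if_false]
                  have h2 := ih msg (sym ++ [c])
                  rw [hf] at h2
                  exact h2
                · simp only [ne_eq, hv, not_false_eq_true, if_true]
                  have h2 := ih (msg ++ v.toList) []
                  simp only [pvFind] at h2
                  exact h2

-- ===== VERDICT (by name: the statement is the Claim_ definition above) =====
theorem shennon_fano_decompression_spec : Claim_equal_shennon_fano_decompression := by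
  intro code dict _
  unfold Spec_shennon_fano_decompression shennon_fano_decompression shennon_fano_decompression_alt
  have := pv_loop (dict.map (fun p => (p.1.toList, p.2))) code.toList [] []
  simpa [pvFind] using congrArg String.mk this
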